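-- pv_equiv track=rewrite | github.com/stodd1031/CompressionResearch | not useful/varWithRep.py | getSumLeftArrRec
-- ===== SOURCE A (Python) =====
-- def getSumLeftArrRec(arr, outArr):
--     newArr = []
--     for index in range(0, len(arr)-1):
--         newArr.append(arr[index] + arr[index + 1])
--     outArr.append(newArr[0])
--     if (len(arr) == 2):
--         return outArr
--     else:
--         return getSumLeftArrRec(newArr, outArr)
-- ===== SOURCE B (Python) =====
-- def getSumLeftArrRec(arr, outArr):
--     # Binomial-transform re-implementation: the k-th appended value is
--     # sum_i C(k, i) * arr[i].  We keep one Pascal row of binomial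
--     # coefficients and dot it with the ORIGINAL array each round, instead
--     # of rebuilding the whole adjacent-sum pyramid level by level.
--     coeffs = [1]
--     for k in range(1, len(arr)):
--         coeffs = [1] + [coeffs[i] + coeffs[i + 1] for i in range(len(coeffs) - 1)] + [1]
--         outArr.append(sum(c * a for c, a in zip(coeffs, arr)))
--     return outArr
-- ===== Notes on version B (the rewrite author's own statement) =====
-- stated objective: alternative
-- what changed: Replaced the recursive rebuilding of the adjacent-sum pyramid by the binomial-transform closed form: one Pascal row of binomial coefficients is maintained and dotted with the original array each round, so no intermediate arrays are ever rebuilt.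
-- outside the precondition, e.g. on getSumLeftArrRec([5], []): A raises IndexError, B returns []
import Mathlib
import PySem

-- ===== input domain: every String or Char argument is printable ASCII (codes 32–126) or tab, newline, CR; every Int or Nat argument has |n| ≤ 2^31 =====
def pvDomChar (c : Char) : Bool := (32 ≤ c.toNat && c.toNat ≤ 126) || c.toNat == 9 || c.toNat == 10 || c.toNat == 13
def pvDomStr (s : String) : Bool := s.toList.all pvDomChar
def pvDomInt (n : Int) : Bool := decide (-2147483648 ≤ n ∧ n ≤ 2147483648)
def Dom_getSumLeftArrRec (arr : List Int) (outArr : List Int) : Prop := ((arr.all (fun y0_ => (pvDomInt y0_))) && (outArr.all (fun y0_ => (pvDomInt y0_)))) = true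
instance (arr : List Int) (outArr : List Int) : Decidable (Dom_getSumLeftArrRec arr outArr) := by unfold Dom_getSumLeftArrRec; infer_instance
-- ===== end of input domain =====

-- B replaces A's recursive rebuilding of the adjacent-sum pyramid by the binomial-
-- transform closed form (maintain one Pascal row, dot it with the original array);
-- return value only — both Pythons mutate outArr in place identically.

-- ===== PORT A =====
-- newArr = []; for index in range(0, len(arr)-1): newArr.append(arr[index] + arr[index+1])
def pvRowA (arr : List Int) : List Int :=
  (List.range (arr.length - 1)).foldl
    (fun acc index => acc ++ [arr.getD index 0 + arr.getD (index + 1) 0]) []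
-- indices above are always in range; fuel arr.length makes the recursion total
-- (Python raises IndexError before any non-terminating recursion; Pre_ excludes that)
def getSumLeftArrRecFuel : Nat → List Int → List Int → List Int
  | 0, _, outArr => outArr
  | fuel + 1, arr, outArr =>
    let newArr := pvRowA arr
    let outArr2 := outArr ++ [newArr.getD 0 0]
    if arr.length == 2 then outArr2
    else getSumLeftArrRecFuel fuel newArr outArr2

def getSumLeftArrRec (arr : List Int) (outArr : List Int) : List Int :=
  getSumLeftArrRecFuel arr.length arr outArr

-- ===== PORT B =====
-- coeffs = [1] + [coeffs[i] + coeffs[i+1] for i in range(len(coeffs)-1)] + [1]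
def pvNextB (coeffs : List Int) : List Int :=
  1 :: ((List.range (coeffs.length - 1)).map
          (fun i => coeffs.getD i 0 + coeffs.getD (i + 1) 0)) ++ [1]
-- sum(c * a for c, a in zip(coeffs, arr))
def pvDotB (coeffs arr : List Int) : Int :=
  ((coeffs.zip arr).map (fun p => p.1 * p.2)).sum
-- for k in range(1, len(arr)): …
def getSumLeftArrRec_alt (arr : List Int) (outArr : List Int) : List Int :=
  ((PySem.List.pyRange 1 arr.length 1).foldl
    (fun (st : List Int × List Int) _k =>
      let coeffs := pvNextB st.1
      (coeffs, st.2 ++ [pvDotB coeffs arr]))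
    (([1] : List Int), outArr)).2

-- ===== PRECONDITION & SPEC =====
-- Pre_ excludes arrays of length < 2, on which the Python A raises IndexError.
def Pre_getSumLeftArrRec (arr : List Int) (outArr : List Int) : Prop := 2 ≤ arr.length
instance (arr : List Int) (outArr : List Int) : Decidable (Pre_getSumLeftArrRec arr outArr) := by
  unfold Pre_getSumLeftArrRec; infer_instance
def pvWitness_getSumLeftArrRec : List Int × List Int := ([1, 2, 3], [0])
def Spec_getSumLeftArrRec (arr : List Int) (outArr : List Int) (out : List Int) : Prop := out = getSumLeftArrRec_alt arr outArr
instance (arr : List Int) (outArr : List Int) (out : List Int) : Decidable (Spec_getSumLeftArrRec arr outArr out) := by unfold Spec_getSumLeftArrRec; infer_instance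

-- ===== CLAIM (what is proved, stated in full; the proofs are below) =====
def Claim_equal_getSumLeftArrRec : Prop := ∀ (arr : List Int) (outArr : List Int), Dom_getSumLeftArrRec arr outArr → Pre_getSumLeftArrRec arr outArr → Spec_getSumLeftArrRec arr outArr (getSumLeftArrRec arr outArr)

-- ===== LEMMAS AND PROOFS =====

-- dot product unfolding lemma
theorem pvDotB_cons (c0 a0 : Int) (c a : List Int) :
    pvDotB (c0 :: c) (a0 :: a) = c0 * a0 + pvDotB c a := by simp [pvDotB]

-- A's row, rewritten as zipWith over the tail
theorem pvRowA_eq_zipWith (arr : List Int) :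
    pvRowA arr = List.zipWith (· + ·) arr arr.tail := by
  unfold pvRowA
  rw [PySem.List.foldl_append_singleton_eq_map]
  apply List.ext_getElem
  · cases arr <;> simp
  · intro i h1 h2
    simp only [List.nil_append, List.getElem_map, List.getElem_range, List.getElem_zipWith]
    have hlen : i + 1 < arr.length := by simp at h1; omega
    rw [List.getD_eq_getElem _ _ (by omega), List.getD_eq_getElem _ _ hlen, List.getElem_tail]

-- B's Pascal middle, rewritten as zipWith over the tail
theorem pvMid_eq_zipWith (c : List Int) :
    (List.range (c.length - 1)).map (fun i => c.getD i 0 + c.getD (i + 1) 0)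
      = List.zipWith (· + ·) c c.tail := by
  apply List.ext_getElem
  · cases c <;> simp
  · intro i h1 h2
    simp only [List.getElem_map, List.getElem_range, List.getElem_zipWith]
    have hlen : i + 1 < c.length := by simp at h1; omega
    rw [List.getD_eq_getElem _ _ (by omega), List.getD_eq_getElem _ _ hlen, List.getElem_tail]

theorem pvNextB_eq (c : List Int) :
    pvNextB c = 1 :: List.zipWith (· + ·) c c.tail ++ [1] := by
  unfold pvNextB; rw [pvMid_eq_zipWith]

-- padding the tail with a trailing zero exposes the last element
theorem pvZipPad : ∀ (c : List Int) (x : Int), c.getLast? = some x →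
    List.zipWith (· + ·) c (c.tail ++ [0]) = List.zipWith (· + ·) c c.tail ++ [x] := by
  intro c
  induction c with
  | nil => intro x hx; simp at hx
  | cons c0 c' ih =>
    intro x hx
    cases c' with
    | nil => simp at hx; simp [hx]
    | cons c1 c'' =>
      rw [List.getLast?_cons_cons] at hx
      have h2 := ih x hx
      simp only [List.tail_cons] at h2
      simp only [List.tail_cons, List.cons_append, List.zipWith_cons_cons, h2]

-- zipWith (0::c) (c++[0]) form of the Pascal step, valid when head = last = 1
theorem pvNextB_eq_zip (c : List Int) (hne : c ≠ []) (hh : c.head? = some 1)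
    (hl : c.getLast? = some 1) :
    pvNextB c = List.zipWith (· + ·) (0 :: c) (c ++ [0]) := by
  rw [pvNextB_eq]
  cases c with
  | nil => exact absurd rfl hne
  | cons c0 c' =>
    simp only [List.head?_cons, Option.some.injEq] at hh
    subst hh
    have hz := pvZipPad (1 :: c') 1 hl
    simp only [List.tail_cons] at hz ⊢
    show _ = (0 + 1) :: List.zipWith (· + ·) (1 :: c') (c' ++ [0])
    rw [hz]; norm_num

-- the key dot identity, generalized over the head coefficient
theorem pvDot_zip (c : List Int) (x a : Int) (arr : List Int) (h : c.length ≤ arr.length) :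
    pvDotB (List.zipWith (· + ·) (x :: c) (c ++ [0])) (a :: arr)
      = x * a + pvDotB c (List.zipWith (· + ·) (a :: arr) arr) := by
  induction c generalizing x a arr with
  | nil => simp [pvDotB]
  | cons c0 c' ih =>
    cases arr with
    | nil => simp at h
    | cons a1 r =>
      have h' : c'.length ≤ r.length := by simpa using h
      simp only [List.cons_append, List.zipWith_cons_cons, pvDotB_cons]
      rw [ih c0 a1 r h']
      ring

-- dotting the next Pascal row with arr = dotting the current row with arr's adjacent sums
theorem pvDot_next (d arr : List Int) (hne : d ≠ []) (hh : d.head? = some 1)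
    (hl : d.getLast? = some 1) (hlen : d.length < arr.length) :
    pvDotB (pvNextB d) arr = pvDotB d (List.zipWith (· + ·) arr arr.tail) := by
  rw [pvNextB_eq_zip d hne hh hl]
  cases arr with
  | nil => simp at hlen
  | cons a arr' =>
    have := pvDot_zip d 0 a arr' (by simp at hlen; omega)
    simpa using this

-- invariants of the Pascal step
theorem pvNextB_ne (c : List Int) : pvNextB c ≠ [] := by simp [pvNextB]
theorem pvNextB_head (c : List Int) : (pvNextB c).head? = some 1 := by simp [pvNextB]
theorem pvNextB_last (c : List Int) : (pvNextB c).getLast? = some 1 := by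
  rw [pvNextB_eq, List.getLast?_concat]
theorem pvNextB_length (c : List Int) (h : c ≠ []) :
    (pvNextB c).length = c.length + 1 := by
  cases c with
  | nil => exact absurd rfl h
  | cons c0 c' => simp [pvNextB]

-- B's loop as a recursion on the number of remaining rounds
def pvBgen : Nat → List Int → List Int → List Int → List Int
  | 0, _, _, out => out
  | k + 1, c, arr, out =>
    let c' := pvNextB c
    pvBgen k c' arr (out ++ [pvDotB c' arr])

theorem pvFoldl_eq_Bgen (arr : List Int) (l : List Int) (c out : List Int) :
    (l.foldl (fun (st : List Int × List Int) _k =>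
        let coeffs := pvNextB st.1
        (coeffs, st.2 ++ [pvDotB coeffs arr])) (c, out)).2
      = pvBgen l.length c arr out := by
  induction l generalizing c out with
  | nil => rfl
  | cons y l' ih => simpa [pvBgen] using ih _ _

-- swapping one Pascal step for one adjacent-sum step, k times
theorem pvSwap (k : Nat) (c arr out : List Int) (hne : c ≠ []) (hh : c.head? = some 1)
    (hl : c.getLast? = some 1) (hlen : c.length + k < arr.length) :
    pvBgen k (pvNextB c) arr out = pvBgen k c (List.zipWith (· + ·) arr arr.tail) out := by
  induction k generalizing c out with
  | zero => rfl
  | succ n ih =>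
    simp only [pvBgen]
    rw [pvDot_next (pvNextB c) arr (pvNextB_ne c) (pvNextB_head c) (pvNextB_last c)
          (by rw [pvNextB_length c hne]; omega)]
    exact ih (pvNextB c) _ (pvNextB_ne c) (pvNextB_head c) (pvNextB_last c)
      (by rw [pvNextB_length c hne]; omega)

theorem pvNextB_one : pvNextB [1] = [1, 1] := rfl

-- the main bridge: A's fuelled recursion = B's Pascal-row loop
theorem pvMain : ∀ n arr out, arr.length = n → 2 ≤ n →
    getSumLeftArrRecFuel arr.length arr out = pvBgen (arr.length - 1) [1] arr out := by
  intro n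
  induction n using Nat.strong_induction_on with
  | _ n ih =>
    intro arr out hn h2
    match arr with
    | [] => simp at hn; omega
    | [a0] => simp at hn; omega
    | a0 :: a1 :: r =>
      have hrow : pvRowA (a0 :: a1 :: r)
          = (a0 + a1) :: List.zipWith (· + ·) (a1 :: r) r := by
        rw [pvRowA_eq_zipWith]; rfl
      have hdot1 : pvDotB [1, 1] (a0 :: a1 :: r) = a0 + a1 := by
        simp [pvDotB]
      cases r with
      | nil =>
        show getSumLeftArrRecFuel 2 [a0, a1] out = pvBgen 1 [1] [a0, a1] out
        simp only [getSumLeftArrRecFuel, pvBgen, pvNextB_one]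
        simp [hrow, hdot1]
      | cons b r' =>
        have hget : (pvRowA (a0 :: a1 :: b :: r')).getD 0 0 = a0 + a1 := by
          rw [hrow]; rfl
        show getSumLeftArrRecFuel (r'.length + 3) (a0 :: a1 :: b :: r') out
              = pvBgen (r'.length + 2) [1] (a0 :: a1 :: b :: r') out
        have hlrow : (pvRowA (a0 :: a1 :: b :: r')).length = r'.length + 2 := by
          rw [pvRowA_eq_zipWith]; simp
        have hA : getSumLeftArrRecFuel (r'.length + 3) (a0 :: a1 :: b :: r') out
            = getSumLeftArrRecFuel (r'.length + 2) (pvRowA (a0 :: a1 :: b :: r'))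
                (out ++ [(pvRowA (a0 :: a1 :: b :: r')).getD 0 0]) := by
          simp only [getSumLeftArrRecFuel]
          rw [if_neg (by simp)]
        rw [hA]
        have hn' : r'.length + 3 = n := by simpa using hn
        have hrec := ih (r'.length + 2) (by omega) (pvRowA (a0 :: a1 :: b :: r'))
          (out ++ [(pvRowA (a0 :: a1 :: b :: r')).getD 0 0]) hlrow (by omega)
        rw [hlrow] at hrec
        rw [hrec, hget]
        -- unfold exactly one round of B on the right
        have e1 : pvBgen (r'.length + 2) [1] (a0 :: a1 :: b :: r') out
            = pvBgen (r'.length + 1) (pvNextB [1]) (a0 :: a1 :: b :: r')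
                (out ++ [pvDotB (pvNextB [1]) (a0 :: a1 :: b :: r')]) := rfl
        rw [show r'.length + 2 - 1 = r'.length + 1 from rfl, e1, pvNextB_one, hdot1,
          ← pvNextB_one,
          pvSwap (r'.length + 1) [1] (a0 :: a1 :: b :: r') (out ++ [a0 + a1])
            (by simp) (by simp) (by simp) (by simp; omega),
          show List.zipWith (· + ·) (a0 :: a1 :: b :: r') (a0 :: a1 :: b :: r').tail
              = pvRowA (a0 :: a1 :: b :: r') from (pvRowA_eq_zipWith _).symm]

-- ===== VERDICT (by name: the statement is the Claim_ definition above) =====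
theorem getSumLeftArrRec_spec : Claim_equal_getSumLeftArrRec := by
  intro arr out _ hpre
  unfold Spec_getSumLeftArrRec getSumLeftArrRec getSumLeftArrRec_alt
  rw [pvFoldl_eq_Bgen arr]
  rw [PySem.List.length_pyRange_one]
  have h1 : ((arr.length : Int) - 1).toNat = arr.length - 1 := by omega
  rw [h1]
  exact pvMain arr.length arr out rfl hpre
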